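-- pv_equiv track=rewrite | github.com/nubonics/BotCommandCenter | app/main.py | _merge_tags
-- ===== SOURCE A (Python) =====
-- def _split_tags(raw_tags: str | None) -> list[str]:
--     if not raw_tags:
--         return []
--
--     seen: set[str] = set()
--     ordered: list[str] = []
--     for part in str(raw_tags).replace("\n", ",").split(","):
--         tag = part.strip().lower()
--         if not tag or tag in seen:
--             continue
--         seen.add(tag)
--         ordered.append(tag)
--     return ordered
--
-- def _merge_tags(existing_tags: str | None, add_tags: str | None = None, remove_tags: str | None = None) -> str | None:
--     current = _split_tags(existing_tags)
--     current_set = set(current)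
--
--     for tag in _split_tags(add_tags):
--         if tag not in current_set:
--             current.append(tag)
--             current_set.add(tag)
--
--     remove_set = set(_split_tags(remove_tags))
--     if remove_set:
--         current = [tag for tag in current if tag not in remove_set]
--
--     return ", ".join(current) or None
-- ===== SOURCE B (Python) =====
-- def _merge_tags(existing_tags, add_tags=None, remove_tags=None):
--     def tokens(raw):
--         if not raw:
--             return []
--         return [p.strip().lower() for p in str(raw).replace("\n", ",").split(",")]
--
--     drop = set(tokens(remove_tags))
--     kept = [t for t in tokens(existing_tags) + tokens(add_tags)
--             if t and t not in drop]
--     # dedupe by selection-and-deletion: take the head, delete its later copies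
--     out = []
--     while kept:
--         head = kept[0]
--         out.append(head)
--         kept = [t for t in kept[1:] if t != head]
--     result = ", ".join(out)
--     return result or None
-- ===== Notes on version B (the rewrite author's own statement) =====
-- stated objective: alternative
-- what changed: A dedupes with a parallel seen-set/ordered-list loop inside the split helper plus a second incremental membership loop for adds and a guarded remove phase; B filters empties and removed tags first and then dedupes by selection-and-deletion (repeatedly emit the head and delete all its later copies from the worklist), using no seen-set or dict for deduplication.
import Mathlib
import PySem

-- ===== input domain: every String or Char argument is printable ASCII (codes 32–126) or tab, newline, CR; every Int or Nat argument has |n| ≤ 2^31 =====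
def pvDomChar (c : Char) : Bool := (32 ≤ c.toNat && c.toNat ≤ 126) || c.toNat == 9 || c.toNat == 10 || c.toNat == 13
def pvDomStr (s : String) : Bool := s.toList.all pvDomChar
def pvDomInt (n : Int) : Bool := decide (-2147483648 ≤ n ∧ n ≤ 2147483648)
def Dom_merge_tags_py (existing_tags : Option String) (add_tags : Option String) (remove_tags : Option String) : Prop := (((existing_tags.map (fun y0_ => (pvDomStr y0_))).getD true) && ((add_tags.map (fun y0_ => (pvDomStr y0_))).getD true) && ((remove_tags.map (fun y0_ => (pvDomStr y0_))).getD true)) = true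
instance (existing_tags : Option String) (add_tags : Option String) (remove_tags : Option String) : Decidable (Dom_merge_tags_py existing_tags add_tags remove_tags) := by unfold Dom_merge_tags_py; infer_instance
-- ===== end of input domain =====

-- B: instead of A's incremental seen-set append loop plus a guarded remove phase, B filters
-- removals/empties first and dedupes by selection-and-deletion (emit head, delete its later
-- copies) — a different algorithm of similar size (objective: alternative, not faster).


-- ===== PORT A =====
-- _split_tags: loop with a parallel 'seen' set and 'ordered' list
def stepSplitA (st : PySem.Set String × List String) (part : String) : PySem.Set String × List String :=
  let tag := PySem.Str.lower (PySem.Str.strip part)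
  if tag = "" ∨ PySem.Set.contains st.1 tag then st
  else (PySem.Set.add st.1 tag, st.2 ++ [tag])

def splitTagsA (raw_tags : Option String) : List String :=
  match raw_tags with
  | none => []
  | some s =>
    if s = "" then []
    else
      (((PySem.Str.replace s "\n" ",").splitOn ",").foldl stepSplitA
        ((PySem.Set.empty : PySem.Set String), ([] : List String))).2

def stepAddA (st : List String × PySem.Set String) (tag : String) : List String × PySem.Set String :=
  if ¬ PySem.Set.contains st.2 tag then (st.1 ++ [tag], PySem.Set.add st.2 tag) else st

def merge_tags_py (existing_tags : Option String) (add_tags : Option String) (remove_tags : Option String) : Option String :=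
  let current := splitTagsA existing_tags
  let current_set : PySem.Set String := PySem.Set.ofList current
  let st := (splitTagsA add_tags).foldl stepAddA (current, current_set)
  let remove_set : PySem.Set String := PySem.Set.ofList (splitTagsA remove_tags)
  let current := if PySem.Set.len remove_set ≠ 0 then
      st.1.filter (fun tag => ¬ PySem.Set.contains remove_set tag)
    else st.1
  let joined := PySem.Str.join ", " current
  if joined = "" then none else some joined

-- ===== PORT B =====
-- Source B's 'tokens': just the split-and-normalise list, no dedup
def tokensB (raw : Option String) : List String :=
  match raw with
  | none => []
  | some s =>
    if s = "" then []
    else ((PySem.Str.replace s "\n" ",").splitOn ",").map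
      (fun p => PySem.Str.lower (PySem.Str.strip p))

-- Source B's while loop: emit the head, delete its later copies from the worklist
def uniqLoopB (out : List String) (ts : List String) : List String :=
  match ts with
  | [] => out
  | h :: t => uniqLoopB (out ++ [h]) (t.filter (fun x => x ≠ h))
termination_by ts.length
decreasing_by
  simp only [List.length_unattach]
  exact Nat.lt_succ_of_le (le_trans (List.length_filter_le _ _) (by simp))

def merge_tags_py_alt (existing_tags : Option String) (add_tags : Option String) (remove_tags : Option String) : Option String :=
  let drop : PySem.Set String := PySem.Set.ofList (tokensB remove_tags)
  let kept := (tokensB existing_tags ++ tokensB add_tags).filter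
    (fun t => decide (t ≠ "") && !(PySem.Set.contains drop t))
  let out := uniqLoopB [] kept
  let result := PySem.Str.join ", " out
  if result = "" then none else some result

-- ===== PRECONDITION & SPEC =====
def Spec_merge_tags_py (existing_tags : Option String) (add_tags : Option String) (remove_tags : Option String) (out : Option String) : Prop := out = merge_tags_py_alt existing_tags add_tags remove_tags
instance (existing_tags : Option String) (add_tags : Option String) (remove_tags : Option String) (out : Option String) : Decidable (Spec_merge_tags_py existing_tags add_tags remove_tags out) := by unfold Spec_merge_tags_py; infer_instance

-- ===== CLAIM (what is proved, stated in full; the proofs are below) =====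
def Claim_equal_merge_tags_py : Prop := ∀ (existing_tags : Option String) (add_tags : Option String) (remove_tags : Option String), Dom_merge_tags_py existing_tags add_tags remove_tags → Spec_merge_tags_py existing_tags add_tags remove_tags (merge_tags_py existing_tags add_tags remove_tags)

-- ===== LEMMAS AND PROOFS =====

-- A's split loop, run with seen = ordered, is Set.update by the nonempty normalised tokens
theorem splitFoldA (parts : List String) (acc : List String) :
    parts.foldl stepSplitA ((acc : PySem.Set String), acc)
    = (PySem.Set.update acc ((parts.map (fun p => PySem.Str.lower (PySem.Str.strip p))).filter (fun t => t ≠ "")),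
       PySem.Set.update acc ((parts.map (fun p => PySem.Str.lower (PySem.Str.strip p))).filter (fun t => t ≠ ""))) := by
  induction parts generalizing acc with
  | nil => simp [PySem.Set.update]
  | cons part rest ih =>
    simp only [List.foldl_cons, List.map_cons, List.filter_cons]
    by_cases h1 : PySem.Str.lower (PySem.Str.strip part) = ""
    · have hstep : stepSplitA ((acc : PySem.Set String), acc) part = (acc, acc) := by
        simp [stepSplitA, h1]
      rw [hstep, ih acc, if_neg (by simp [h1])]
    · by_cases h2 : PySem.Set.contains (acc : PySem.Set String) (PySem.Str.lower (PySem.Str.strip part)) = true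
      · have hm : PySem.Str.lower (PySem.Str.strip part) ∈ acc :=
          (PySem.Set.contains_iff acc _).mp h2
        have hstep : stepSplitA ((acc : PySem.Set String), acc) part = (acc, acc) := by
          simp [stepSplitA, hm]
        rw [hstep, ih acc, if_pos (by simp [h1]), PySem.Set.update_cons,
          PySem.Set.add_of_mem hm]
      · have hnm : PySem.Str.lower (PySem.Str.strip part) ∉ acc := fun hm =>
          h2 ((PySem.Set.contains_iff acc _).mpr hm)
        have hadd : PySem.Set.add (acc : PySem.Set String) (PySem.Str.lower (PySem.Str.strip part))
            = acc ++ [PySem.Str.lower (PySem.Str.strip part)] := PySem.Set.add_of_not_mem hnm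
        have hstep : stepSplitA ((acc : PySem.Set String), acc) part
            = (acc ++ [PySem.Str.lower (PySem.Str.strip part)],
               acc ++ [PySem.Str.lower (PySem.Str.strip part)]) := by
          simp [stepSplitA, h1, hnm]
        rw [hstep, ih (acc ++ [PySem.Str.lower (PySem.Str.strip part)]),
          if_pos (by simp [h1]), PySem.Set.update_cons, hadd]

-- _split_tags = set(nonempty normalised tokens) in first-occurrence order
theorem splitTagsA_eq (raw : Option String) :
    splitTagsA raw = PySem.Set.ofList ((tokensB raw).filter (fun t => t ≠ "")) := by
  match raw with
  | none => rfl
  | some s =>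
    by_cases hs : s = ""
    · simp [splitTagsA, tokensB, hs]
    · simp only [splitTagsA, tokensB, if_neg hs]
      have h := splitFoldA (((PySem.Str.replace s "\n" ",").splitOn ",")) []
      simp only [PySem.Set.empty] at h ⊢
      rw [h]
      rw [show PySem.Set.update ([] : PySem.Set String) = PySem.Set.ofList from rfl]

-- A's add loop from an equal (list, set) pair is Set.update on both components
theorem addFoldA (tags : List String) (s : List String) :
    tags.foldl stepAddA (s, (s : PySem.Set String))
    = (PySem.Set.update s tags, PySem.Set.update s tags) := by
  induction tags generalizing s with
  | nil => simp [PySem.Set.update]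
  | cons tag rest ih =>
    simp only [List.foldl_cons]
    by_cases h : PySem.Set.contains (s : PySem.Set String) tag = true
    · have hm : tag ∈ s := (PySem.Set.contains_iff s tag).mp h
      have hstep : stepAddA (s, (s : PySem.Set String)) tag = (s, s) := by
        simp [stepAddA, hm]
      rw [hstep, ih s, PySem.Set.update_cons, PySem.Set.add_of_mem hm]
    · have hnm : tag ∉ s := fun hm => h ((PySem.Set.contains_iff s tag).mpr hm)
      have hadd : PySem.Set.add (s : PySem.Set String) tag = s ++ [tag] :=
        PySem.Set.add_of_not_mem hnm
      have hstep : stepAddA (s, (s : PySem.Set String)) tag = (s ++ [tag], s ++ [tag]) := by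
        simp [stepAddA, hnm]
      rw [hstep, ih (s ++ [tag]), PySem.Set.update_cons, hadd]

theorem update_ofList_right (s : PySem.Set String) (xs : List String) :
    PySem.Set.update s (PySem.Set.ofList xs) = PySem.Set.update s xs := by
  rw [PySem.Set.update_eq_append_filter, PySem.Set.update_eq_append_filter, PySem.Set.ofList_ofList]

theorem discard_eq_filter (s : List String) (x : String) :
    PySem.Set.discard s x = s.filter (fun y => !(y == x)) := by
  simp [PySem.Set.discard]

-- set(xs) commutes with filtering
theorem ofList_filter (p : String → Bool) (xs : List String) :
    PySem.Set.ofList (xs.filter p) = (PySem.Set.ofList xs).filter p := by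
  induction xs with
  | nil => rfl
  | cons a xs ih =>
    by_cases hp : p a = true
    · rw [List.filter_cons_of_pos hp, PySem.Set.ofList_cons, PySem.Set.ofList_cons, ih,
        discard_eq_filter, discard_eq_filter, List.filter_cons_of_pos hp]
      congr 1
      rw [List.filter_filter, List.filter_filter]
      apply List.filter_congr
      intro x _
      exact Bool.and_comm _ _
    · rw [List.filter_cons_of_neg hp, PySem.Set.ofList_cons, ih,
        List.filter_cons_of_neg hp, discard_eq_filter, List.filter_filter]
      apply List.filter_congr
      intro x _
      by_cases hx : x = a
      · subst hx; simp [hp]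
      · simp [hx]

theorem uniqLoopB_nil (out : List String) : uniqLoopB out [] = out := by
  rw [uniqLoopB.eq_def]

theorem uniqLoopB_cons (out : List String) (x : String) (t : List String) :
    uniqLoopB out (x :: t) = uniqLoopB (out ++ [x]) (t.filter (fun y => y ≠ x)) := by
  rw [uniqLoopB.eq_def]

-- Source B's selection-and-deletion loop computes set(ts) after out
theorem uniqLoopB_eq_aux (n : ℕ) : ∀ ts : List String, ts.length ≤ n →
    ∀ out, uniqLoopB out ts = out ++ PySem.Set.ofList ts := by
  induction n with
  | zero =>
    intro ts h out
    have : ts = [] := List.eq_nil_of_length_eq_zero (Nat.le_zero.mp h)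
    subst this
    simp [uniqLoopB_nil]
  | succ n ih =>
    intro ts h out
    match ts with
    | [] => simp [uniqLoopB_nil]
    | x :: t =>
      rw [uniqLoopB_cons]
      have hlen : (t.filter (fun y => y ≠ x)).length ≤ n :=
        le_trans (List.length_filter_le _ _) (Nat.succ_le_succ_iff.mp h)
      rw [ih _ hlen, PySem.Set.ofList_cons, discard_eq_filter, ← ofList_filter]
      have hpred : t.filter (fun y => decide (y ≠ x)) = t.filter (fun y => !(y == x)) := by
        apply List.filter_congr; intro y _; simp [beq_eq_decide]
      rw [hpred, List.append_assoc, List.singleton_append]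

theorem uniqLoopB_eq (out ts : List String) :
    uniqLoopB out ts = out ++ PySem.Set.ofList ts :=
  uniqLoopB_eq_aux ts.length ts le_rfl out

-- ===== VERDICT (by name: the statement is the Claim_ definition above) =====
theorem merge_tags_py_spec : Claim_equal_merge_tags_py := by
  intro e a r _
  unfold Spec_merge_tags_py merge_tags_py merge_tags_py_alt
  simp only [splitTagsA_eq, uniqLoopB_eq, List.nil_append]
  simp only [PySem.Set.ofList_ofList]
  rw [addFoldA, update_ofList_right]
  simp only [decide_not, Bool.decide_coe]
  have hU : (PySem.Set.ofList ((tokensB e).filter (fun t => !decide (t = "")))).update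
        ((tokensB a).filter (fun t => !decide (t = "")))
      = (PySem.Set.ofList (tokensB e ++ tokensB a)).filter (fun t => !decide (t = "")) := by
    rw [← PySem.Set.ofList_append, ← List.filter_append, ofList_filter]
  have hRHS : PySem.Set.ofList ((tokensB e ++ tokensB a).filter
        (fun t => !decide (t = "") && !(PySem.Set.contains (PySem.Set.ofList (tokensB r)) t)))
      = ((PySem.Set.ofList (tokensB e ++ tokensB a)).filter (fun t => !decide (t = ""))).filter
        (fun t => !(PySem.Set.contains (PySem.Set.ofList (tokensB r)) t)) := by
    rw [ofList_filter, List.filter_filter]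
    exact List.filter_congr (fun x _ => Bool.and_comm _ _)
  rw [hU, hRHS]
  set base := (PySem.Set.ofList (tokensB e ++ tokensB a)).filter (fun t => !decide (t = "")) with hbase
  have hmem : ∀ t ∈ base,
      (!(PySem.Set.contains (PySem.Set.ofList ((tokensB r).filter (fun t => !decide (t = "")))) t))
      = (!(PySem.Set.contains (PySem.Set.ofList (tokensB r)) t)) := by
    intro t ht
    have htne : t ≠ "" := by
      have := List.of_mem_filter ht
      simpa using this
    congr 1
    simp only [PySem.Set.contains_eq_listContains]
    simp [List.mem_filter, htne]
  by_cases hr : PySem.Set.ofList ((tokensB r).filter (fun t => !decide (t = ""))) = ([] : List String)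
  · have hrt : ∀ t ∈ base, (!(PySem.Set.contains (PySem.Set.ofList (tokensB r)) t)) = true := by
      intro t ht
      rw [← hmem t ht, hr]
      simp [PySem.Set.contains]
    have hcond : ¬ ((PySem.Set.ofList ((tokensB r).filter (fun t => !decide (t = "")))).len ≠ 0) := by
      simp [hr, PySem.Set.len]
    rw [if_neg hcond, List.filter_congr hrt, List.filter_eq_self.mpr (fun _ _ => rfl)]
  · have hlen : PySem.Set.len (PySem.Set.ofList ((tokensB r).filter (fun t => !decide (t = "")))) ≠ 0 := by
      simp only [PySem.Set.len]
      intro hc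
      exact hr (List.eq_nil_of_length_eq_zero (by exact_mod_cast hc))
    rw [if_pos hlen, List.filter_congr hmem]
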